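-- pv_equiv track=rewrite | github.com/karantras/Translation-CDDA-Project | utilities.py | list_writer
-- ===== SOURCE A (Python) =====
-- key_words = ["[Names]",
-- 			"[Descriptions]",
-- 			"[Job_Description]",
-- 			"[Start Names]",
-- 			"[Sound]",
-- 			"[Monster massages]",
-- 			"[Messages]",
-- 			"[Attacks]",
-- 			"[Buffes]"]
--
-- def list_writer(e_list, strings, index):
-- 	for item in strings[1+index:]:
-- 		index += 1
-- 		if item in key_words:
-- 			break
-- 		else:
-- 			e_list.append(item)
-- 	return index
-- ===== SOURCE B (Python) =====
-- key_words = ["[Names]",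
-- 			"[Descriptions]",
-- 			"[Job_Description]",
-- 			"[Start Names]",
-- 			"[Sound]",
-- 			"[Monster massages]",
-- 			"[Messages]",
-- 			"[Attacks]",
-- 			"[Buffes]"]
--
-- def list_writer(e_list, strings, index):
--     tail = strings[1 + index:]
--     stop = next((k for k, item in enumerate(tail) if item in key_words), None)
--     if stop is None:
--         e_list.extend(tail)
--         return index + len(tail)
--     e_list.extend(tail[:stop])
--     return index + 1 + stop
-- ===== Notes on version B (the rewrite author's own statement) =====
-- stated objective: alternative
-- what changed: B finds the offset of the first keyword in the tail slice up front (generator + next), then bulk-copies the prefix with one extend and returns the stop index by arithmetic, instead of A's item-by-item loop that mutates the index and appends while scanning.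
import Mathlib
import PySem

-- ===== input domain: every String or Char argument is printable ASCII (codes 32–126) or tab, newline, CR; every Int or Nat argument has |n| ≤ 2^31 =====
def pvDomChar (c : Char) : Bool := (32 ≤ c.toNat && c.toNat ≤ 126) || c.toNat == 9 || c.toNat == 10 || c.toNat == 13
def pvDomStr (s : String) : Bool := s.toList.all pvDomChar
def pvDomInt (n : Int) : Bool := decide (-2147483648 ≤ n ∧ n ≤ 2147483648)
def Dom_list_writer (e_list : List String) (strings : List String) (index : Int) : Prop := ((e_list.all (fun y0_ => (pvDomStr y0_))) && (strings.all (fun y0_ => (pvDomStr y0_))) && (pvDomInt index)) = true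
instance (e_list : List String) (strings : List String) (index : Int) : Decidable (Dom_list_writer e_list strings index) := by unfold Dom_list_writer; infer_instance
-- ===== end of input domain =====

-- B locates the first keyword in the tail slice first, then returns the stop index by
-- arithmetic (alternative decomposition; A's in-place appends to e_list are not modelled:
-- the equivalence proved is about the RETURN value only).

-- module-level constant key_words (shared by both Pythons)
def keyWords : List String := ["[Names]",
  "[Descriptions]",
  "[Job_Description]",
  "[Start Names]",
  "[Sound]",
  "[Monster massages]",
  "[Messages]",
  "[Attacks]",
  "[Buffes]"]

-- ===== PORT A =====
-- the for-loop over strings[1+index:]: index += 1, break on keyword, else append (append not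
-- observable in the Int return value)
def listWriterLoopA : List String → Int → Int
  | [], index => index
  | item :: rest, index =>
      if item ∈ keyWords then index + 1 else listWriterLoopA rest (index + 1)

def list_writer (e_list : List String) (strings : List String) (index : Int) : Int :=
  listWriterLoopA (PySem.List.slice strings (some (1 + index)) none) index

-- ===== PORT B =====
def list_writer_alt (e_list : List String) (strings : List String) (index : Int) : Int :=
  let tail := PySem.List.slice strings (some (1 + index)) none
  match tail.findIdx? (fun item => decide (item ∈ keyWords)) with
  | some stop => index + 1 + (stop : Int)
  | none => index + (tail.length : Int)

-- ===== PRECONDITION & SPEC =====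
def Spec_list_writer (e_list : List String) (strings : List String) (index : Int) (out : Int) : Prop := out = list_writer_alt e_list strings index
instance (e_list : List String) (strings : List String) (index : Int) (out : Int) : Decidable (Spec_list_writer e_list strings index out) := by unfold Spec_list_writer; infer_instance

-- ===== CLAIM (what is proved, stated in full; the proofs are below) =====
def Claim_equal_list_writer : Prop := ∀ (e_list : List String) (strings : List String) (index : Int), Dom_list_writer e_list strings index → Spec_list_writer e_list strings index (list_writer e_list strings index)

-- ===== LEMMAS AND PROOFS =====
theorem listWriterLoopA_eq_findIdx? (tail : List String) (i : Int) :
    listWriterLoopA tail i =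
      match tail.findIdx? (fun item => decide (item ∈ keyWords)) with
      | some stop => i + 1 + (stop : Int)
      | none => i + (tail.length : Int) := by
  induction tail generalizing i with
  | nil => simp [listWriterLoopA]
  | cons x xs ih =>
      by_cases hx : x ∈ keyWords
      · simp [listWriterLoopA, hx, List.findIdx?_cons]
      · simp only [listWriterLoopA, List.findIdx?_cons, decide_eq_true_eq, hx, if_false, ih]
        cases xs.findIdx? (fun item => decide (item ∈ keyWords)) with
        | none => simp; ring
        | some k => simp; ring

-- ===== VERDICT (by name: the statement is the Claim_ definition above) =====
theorem list_writer_spec : Claim_equal_list_writer := by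
  intro e_list strings index _
  unfold Spec_list_writer list_writer list_writer_alt
  exact listWriterLoopA_eq_findIdx? _ _
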